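-- pv_equiv track=rewrite | github.com/hedging8563/lemonclaw | lemonclaw/utils/attachments.py | media_paths
-- ===== SOURCE A (Python) =====
-- from typing import Any
--
-- def media_paths(media: list[Any] | None) -> list[str]:
--     out: list[str] = []
--     for item in media or []:
--         if isinstance(item, str) and item:
--             out.append(item)
--         elif isinstance(item, dict) and isinstance(item.get("path"), str) and item.get("path"):
--             out.append(str(item["path"]))
--     seen: set[str] = set()
--     deduped: list[str] = []
--     for path in out:
--         if path not in seen:
--             seen.add(path)
--             deduped.append(path)
--     return deduped
-- ===== SOURCE B (Python) =====
-- def media_paths(media):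
--     def path_of(item):
--         if isinstance(item, str) and item:
--             return item
--         if isinstance(item, dict):
--             p = item.get("path")
--             if isinstance(p, str) and p:
--                 return str(p)
--         return None
--
--     # nub by deletion: take the first valid path, delete all its later
--     # duplicates from the remaining worklist, repeat. No seen-set, no
--     # membership test against an accumulator.
--     out = []
--     remaining = list(media or [])
--     while remaining:
--         p = path_of(remaining[0])
--         rest = remaining[1:]
--         if p is None:
--             remaining = rest
--         else:
--             out.append(p)
--             remaining = [it for it in rest if path_of(it) != p]
--     return out
-- ===== Notes on version B (the rewrite author's own statement) =====
-- stated objective: alternative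
-- what changed: Replaced A's two-pass collect-then-dedup-with-a-seen-set by a nub-by-deletion worklist: take the first valid path, delete all its later duplicates from the remaining items, repeat; no seen-set or membership test against the output exists.
import Mathlib
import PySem

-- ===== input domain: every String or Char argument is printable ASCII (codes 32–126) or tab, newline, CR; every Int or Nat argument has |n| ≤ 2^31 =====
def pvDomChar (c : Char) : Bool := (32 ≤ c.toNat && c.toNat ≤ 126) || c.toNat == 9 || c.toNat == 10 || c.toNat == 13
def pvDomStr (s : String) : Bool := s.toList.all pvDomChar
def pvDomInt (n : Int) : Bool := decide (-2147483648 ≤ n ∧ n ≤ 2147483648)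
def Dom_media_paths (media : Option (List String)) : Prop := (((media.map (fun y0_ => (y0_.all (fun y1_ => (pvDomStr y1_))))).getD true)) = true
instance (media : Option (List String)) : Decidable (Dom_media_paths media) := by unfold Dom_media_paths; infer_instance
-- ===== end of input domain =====

-- B replaces A's collect-then-dedup-with-a-seen-set by a recursive nub that takes the first
-- valid path and deletes its later duplicates before recursing; objective: alternative.
-- On Option (List String) every item is a string, so A's dict branch is unreachable and the
-- ports carry only the string branch.

-- ===== PORT A =====
def media_paths (media : Option (List String)) : List String :=
  -- first loop: collect non-empty strings
  let out := (media.getD []).foldl (fun acc item => if item ≠ "" then acc ++ [item] else acc) []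
  -- second loop: dedup keeping first occurrences, via a seen set
  let dd := out.foldl
    (fun (st : PySem.Set String × List String) path =>
      if path ∈ st.1 then st else (st.1.add path, st.2 ++ [path]))
    (PySem.Set.empty, [])
  dd.2

-- ===== PORT B =====
-- path_of: on a string item, a non-empty string is its own path, else no path
def pvPathOf (s : String) : Option String := if s ≠ "" then some s else none

-- the comprehension [it for it in rest if path_of(it) != p], ported by hand step for step
def pvRemove (p : String) : List String → List String
  | [] => []
  | y :: r => if pvPathOf y ≠ some p then y :: pvRemove p r else pvRemove p r

theorem length_pvRemove_le (p : String) (r : List String) :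
    (pvRemove p r).length ≤ r.length := by
  induction r with
  | nil => simp [pvRemove]
  | cons y r ih => rw [pvRemove]; split <;> simp <;> omega

def pvNub : List String → List String
  | [] => []
  | x :: rest =>
    match pvPathOf x with
    | none => pvNub rest
    | some p => p :: pvNub (pvRemove p rest)
termination_by xs => xs.length
decreasing_by
  · simp
  · exact Nat.lt_succ_of_le (length_pvRemove_le _ _)

def media_paths_alt (media : Option (List String)) : List String :=
  pvNub (media.getD [])

-- ===== PRECONDITION & SPEC =====
def Spec_media_paths (media : Option (List String)) (out : List String) : Prop := out = media_paths_alt media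
instance (media : Option (List String)) (out : List String) : Decidable (Spec_media_paths media out) := by unfold Spec_media_paths; infer_instance

-- ===== CLAIM (what is proved, stated in full; the proofs are below) =====
def Claim_equal_media_paths : Prop := ∀ (media : Option (List String)), Dom_media_paths media → Spec_media_paths media (media_paths media)

-- ===== LEMMAS AND PROOFS =====

-- A's first loop collects exactly the non-empty strings, in order.
theorem collect_eq_filter (xs : List String) (acc : List String) :
    xs.foldl (fun acc item => if item ≠ "" then acc ++ [item] else acc) acc
      = acc ++ xs.filter (fun s => s ≠ "") := by
  induction xs generalizing acc with
  | nil => simp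
  | cons x xs ih =>
    rw [List.foldl_cons, List.filter_cons]
    by_cases h : x = ""
    · rw [if_neg (by simp [h]), if_neg (by simp [h]), ih]
    · rw [if_pos (by simp [h]), if_pos (by simp [h]), ih]
      simp

-- reference dedup with an explicit seen LIST (membership only)
def nubS (S : List String) : List String → List String
  | [] => []
  | y :: r => if y ∈ S then nubS S r else y :: nubS (y :: S) r

-- A's second loop equals nubS, for any seen set whose membership matches S.
theorem ded_eq_nubS (ys : List String) (St : PySem.Set String) (S : List String)
    (acc : List String) (h : ∀ x, x ∈ St ↔ x ∈ S) :
    (ys.foldl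
      (fun (st : PySem.Set String × List String) path =>
        if path ∈ st.1 then st else (st.1.add path, st.2 ++ [path])) (St, acc)).2
      = acc ++ nubS S ys := by
  induction ys generalizing St S acc with
  | nil => simp [nubS]
  | cons y r ih =>
    rw [List.foldl_cons, nubS]
    by_cases hy : y ∈ S
    · rw [if_pos ((h y).mpr hy), if_pos hy]
      exact ih St S acc h
    · rw [if_neg (fun hc => hy ((h y).mp hc)), if_neg hy]
      rw [ih (St.add y) (y :: S) (acc ++ [y])
        (fun x => by simp [PySem.Set.mem_add, h x]; tauto)]
      simp

-- nubS only depends on the seen list through membership.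
theorem nubS_congr (ys : List String) (S S' : List String)
    (h : ∀ x, x ∈ S ↔ x ∈ S') : nubS S ys = nubS S' ys := by
  induction ys generalizing S S' with
  | nil => rfl
  | cons y r ih =>
    rw [nubS, nubS]
    by_cases hy : y ∈ S
    · rw [if_pos hy, if_pos ((h y).mp hy)]; exact ih S S' h
    · rw [if_neg hy, if_neg (fun hc => hy ((h y).mpr hc))]
      rw [ih (y :: S) (y :: S') (fun x => by simp [h x])]

-- marking y as seen = deleting its later copies
theorem nubS_cons_eq_filter (r : List String) (y : String) (S : List String) :
    nubS (y :: S) r = nubS S (r.filter (fun it => it ≠ y)) := by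
  induction r generalizing S with
  | nil => rfl
  | cons z r' ih =>
    rw [List.filter_cons]
    by_cases hz : z = y
    · rw [if_neg (by simp [hz]), nubS, if_pos (by simp [hz])]
      exact ih S
    · rw [if_pos (by simp [hz]), nubS, nubS]
      by_cases hS : z ∈ S
      · rw [if_pos (by simp [hS]), if_pos hS]; exact ih S
      · rw [if_neg (by simp [hz, hS]), if_neg hS]
        rw [nubS_congr r' (z :: y :: S) (y :: z :: S) (fun x => by simp; tauto),
          ih (z :: S)]

-- B's nub equals nubS [] on the nonempty-filtered list.
theorem pvRemove_eq_filter (p : String) (r : List String) :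
    pvRemove p r = r.filter (fun it => pvPathOf it ≠ some p) := by
  induction r with
  | nil => rfl
  | cons y r ih => rw [pvRemove, List.filter_cons]; split <;> simp_all

theorem pvNub_eq_nubS (xs : List String) :
    pvNub xs = nubS [] (xs.filter (fun s => s ≠ "")) := by
  induction xs using pvNub.induct with
  | case1 => simp [pvNub, nubS]
  | case2 x rest hp ih =>
    have hx : x = "" := by
      by_cases h : x = "" <;> simp [pvPathOf, h] at hp ⊢
    rw [pvNub, hp, List.filter_cons, if_neg (by simp [hx])]
    exact ih
  | case3 x rest p hp ih =>
    have hx : x ≠ "" ∧ p = x := by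
      by_cases h : x = "" <;> simp [pvPathOf, h] at hp
      exact ⟨h, hp.symm⟩
    rw [pvNub, hp]
    show p :: pvNub (pvRemove p rest) = _
    rw [List.filter_cons, if_pos (by simp [hx.1]), nubS,
      if_neg (List.not_mem_nil), nubS_cons_eq_filter, ih, pvRemove_eq_filter]
    congr 2
    · exact hx.2
    · rw [List.filter_filter, List.filter_filter]
      apply List.filter_congr
      intro it _
      by_cases h : it = "" <;> simp [pvPathOf, h, hx.2]

-- ===== VERDICT (by name: the statement is the Claim_ definition above) =====
theorem media_paths_spec : Claim_equal_media_paths := by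
  intro media _
  unfold Spec_media_paths media_paths media_paths_alt
  rw [collect_eq_filter,
    ded_eq_nubS _ PySem.Set.empty [] [] (fun x => by simp [PySem.Set.empty]),
    pvNub_eq_nubS]
  simp
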